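-- pv_equiv track=rewrite | github.com/seojihwan/algorithm | Python/programmers/line/1.py | solution
-- ===== SOURCE A (Python) =====
-- from collections import defaultdict
--
-- def solution(boxes):
--     temp = 0
--     d = defaultdict(int)
--     for box in boxes:
--         a, b = box
--         d[a] += 1
--         d[b] += 1
--     for e in d:
--         if d[e] >= 2:
--             temp += d[e] // 2
--     answer = len(boxes) - temp
--     return answer
-- ===== SOURCE B (Python) =====
-- def solution(boxes):
--     vals = sorted(v for box in boxes for v in box)
--     pairs = 0
--     i = 0
--     n = len(vals)
--     while i + 1 < n:
--         if vals[i] == vals[i + 1]: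
--             pairs += 1
--             i += 2
--         else:
--             i += 1
--     return len(boxes) - pairs
-- ===== Notes on version B (the rewrite author's own statement) =====
-- stated objective: alternative
-- what changed: Replaces the defaultdict endpoint-count aggregation plus a second pass over the dict with a sort of the flattened endpoints followed by one linear two-pointer sweep that pairs adjacent equal values.
import Mathlib
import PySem

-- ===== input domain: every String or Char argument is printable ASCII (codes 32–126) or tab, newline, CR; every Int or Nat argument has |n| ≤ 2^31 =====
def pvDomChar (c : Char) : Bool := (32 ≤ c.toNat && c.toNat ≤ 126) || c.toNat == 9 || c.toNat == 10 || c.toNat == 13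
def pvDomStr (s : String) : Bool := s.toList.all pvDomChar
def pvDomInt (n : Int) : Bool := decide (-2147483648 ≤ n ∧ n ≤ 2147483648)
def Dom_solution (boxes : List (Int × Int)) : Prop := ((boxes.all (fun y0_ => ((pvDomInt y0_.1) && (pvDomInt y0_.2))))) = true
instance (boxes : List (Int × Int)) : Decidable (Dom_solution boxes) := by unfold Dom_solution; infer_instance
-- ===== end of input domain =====

-- B replaces A's hash-count aggregation with sort-then-adjacent-pair sweep; alternative decomposition, not claimed faster.

-- ===== PORT A =====
def solution (boxes : List (Int × Int)) : Int :=
  let d : PySem.Dict Int Int :=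
    boxes.foldl (fun d box => (d.modify box.1 0 (· + 1)).modify box.2 0 (· + 1)) PySem.Dict.empty
  let temp : Int :=
    d.keys.foldl (fun temp e =>
      if (2 : Int) ≤ d.getD e 0 then temp + PySem.Int.floordiv (d.getD e 0) 2 else temp) 0
  (boxes.length : Int) - temp

-- ===== PORT B =====
-- the while-loop sweep over the sorted list: i advances by 2 on an adjacent equal pair, else by 1
def pairScan : List Int → Int
  | a :: b :: rest => if a = b then pairScan rest + 1 else pairScan (b :: rest)
  | _ => 0

def solution_alt (boxes : List (Int × Int)) : Int :=
  let vals := PySem.List.sorted (boxes.flatMap (fun box => [box.1, box.2])) (fun v => v) false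
  (boxes.length : Int) - pairScan vals

-- ===== PRECONDITION & SPEC =====
def Spec_solution (boxes : List (Int × Int)) (out : Int) : Prop := out = solution_alt boxes
instance (boxes : List (Int × Int)) (out : Int) : Decidable (Spec_solution boxes out) := by unfold Spec_solution; infer_instance

-- ===== CLAIM (what is proved, stated in full; the proofs are below) =====
def Claim_equal_solution : Prop := ∀ (boxes : List (Int × Int)), Dom_solution boxes → Spec_solution boxes (solution boxes)

-- ===== LEMMAS AND PROOFS =====

-- the common value: total number of matched pairs among the multiset of endpoints
def pvPairs (l : List Int) : Nat := ∑ e ∈ l.toFinset, l.count e / 2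

theorem pvPairs_perm {l l' : List Int} (h : l.Perm l') : pvPairs l = pvPairs l' := by
  unfold pvPairs
  rw [List.toFinset_eq_of_perm _ _ h]
  exact Finset.sum_congr rfl (fun e _ => by rw [h.count_eq])

theorem pvPairs_cons_not_mem (a : Int) (l : List Int) (h : a ∉ l) :
    pvPairs (a :: l) = pvPairs l := by
  unfold pvPairs
  rw [List.toFinset_cons, Finset.sum_insert_of_eq_zero_if_notMem]
  · exact Finset.sum_congr rfl (fun e he => by
      have hea : e ≠ a := by
        intro hea; exact h (by simpa [hea] using List.mem_toFinset.mp he)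
      have hae : ¬ (a = e) := fun hh => hea hh.symm
      simp [List.count_cons, hae])
  · intro _
    have : l.count a = 0 := List.count_eq_zero_of_not_mem h
    simp [List.count_cons_self, this]

theorem pvPairs_cons_cons (a : Int) (l : List Int) :
    pvPairs (a :: a :: l) = pvPairs l + 1 := by
  unfold pvPairs
  by_cases hm : a ∈ l.toFinset
  · have hins : (a :: a :: l).toFinset = l.toFinset := by
      simp [List.toFinset_cons, Finset.insert_eq_self.mpr hm]
    rw [hins, ← Finset.add_sum_erase _ _ hm, ← Finset.add_sum_erase _ _ hm]
    have h1 : (a :: a :: l).count a / 2 = l.count a / 2 + 1 := by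
      simp [List.count_cons_self]; omega
    have h2 : ∀ e ∈ l.toFinset.erase a, (a :: a :: l).count e / 2 = l.count e / 2 := by
      intro e he
      have hae : ¬ (a = e) := fun hh => (Finset.ne_of_mem_erase he) hh.symm
      simp [List.count_cons, hae]
    rw [Finset.sum_congr rfl h2, h1]
    omega
  · have hins : (a :: a :: l).toFinset = insert a l.toFinset := by
      simp [List.toFinset_cons]
    rw [hins, Finset.sum_insert hm]
    have hc : l.count a = 0 := List.count_eq_zero_of_not_mem (fun h => hm (List.mem_toFinset.mpr h))
    have h1 : (a :: a :: l).count a / 2 = 1 := by simp [List.count_cons_self, hc]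
    have h2 : ∀ e ∈ l.toFinset, (a :: a :: l).count e / 2 = l.count e / 2 := by
      intro e he
      have hae : ¬ (a = e) := fun hh => hm (hh ▸ he)
      simp [List.count_cons, hae]
    rw [Finset.sum_congr rfl h2, h1]
    omega

theorem pairScan_eq_pvPairs : ∀ (l : List Int), l.Pairwise (· ≤ ·) →
    pairScan l = (pvPairs l : Int)
  | [], _ => by simp [pairScan, pvPairs]
  | [a], _ => by simp [pairScan, pvPairs]
  | a :: b :: rest, h => by
    by_cases hab : a = b
    · subst hab
      rw [pairScan, if_pos rfl, pvPairs_cons_cons,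
          pairScan_eq_pvPairs rest ((List.pairwise_cons.mp (List.pairwise_cons.mp h).2).2)]
      push_cast; ring
    · have hp : (b :: rest).Pairwise (· ≤ ·) := (List.pairwise_cons.mp h).2
      have hle : a ≤ b := (List.pairwise_cons.mp h).1 b (by simp)
      have hnm : a ∉ b :: rest := by
        intro hmem
        rcases List.mem_cons.mp hmem with h1 | h1
        · exact hab h1
        · have hba : b ≤ a := (List.pairwise_cons.mp hp).1 a h1
          exact hab (le_antisymm hle hba)
      rw [pairScan, if_neg hab, pairScan_eq_pvPairs (b :: rest) hp,
          pvPairs_cons_not_mem a _ hnm]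
termination_by l => l.length


-- A's double-modify loop over boxes is the counter loop over the flattened endpoints
theorem foldl_boxes_eq_flat (boxes : List (Int × Int)) (d : PySem.Dict Int Int) :
    boxes.foldl (fun d box => (d.modify box.1 0 (· + 1)).modify box.2 0 (· + 1)) d
      = (boxes.flatMap (fun b => [b.1, b.2])).foldl (fun d x => d.modify x 0 (· + 1)) d := by
  induction boxes generalizing d with
  | nil => rfl
  | cons b rest ih => simp [List.foldl_cons, ih]

-- temp's guarded fold is the plain sum of the halved counts (count < 2 contributes 0)
theorem foldl_if_sum (keys : List Int) (c : Int → Nat) (acc : Int) :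
    keys.foldl (fun t e =>
      if (2 : Int) ≤ (c e : Int) then t + PySem.Int.floordiv ((c e : Int)) 2 else t) acc
      = acc + ((keys.map (fun e => ((c e / 2 : Nat) : Int))).sum) := by
  induction keys generalizing acc with
  | nil => simp
  | cons k rest ih =>
    rw [List.foldl_cons]
    by_cases h2 : (2 : Int) ≤ (c k : Int)
    · rw [if_pos h2, ih]
      have : PySem.Int.floordiv ((c k : Nat) : Int) 2 = ((c k / 2 : Nat) : Int) := by
        exact_mod_cast PySem.Int.floordiv_natCast (c k) 2
      rw [this]
      simp [List.map_cons, List.sum_cons]; ring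
    · rw [if_neg h2, ih]
      simp [List.map_cons, List.sum_cons]
      all_goals omega

theorem sum_halved_dedup (L : List Int) :
    ((PySem.List.dedup L).map (fun e => ((L.count e / 2 : Nat) : Int))).sum
      = (pvPairs L : Int) := by
  unfold pvPairs
  have hnd : (PySem.List.dedup L).Nodup := PySem.List.nodup_dedup L
  have hfs : (PySem.List.dedup L).toFinset = L.toFinset := by
    apply Finset.ext
    intro x
    simp [List.mem_toFinset]
  rw [← List.sum_toFinset _ hnd, hfs]
  push_cast
  rfl

-- ===== VERDICT (by name: the statement is the Claim_ definition above) =====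
theorem solution_spec : Claim_equal_solution := by
  intro boxes _
  unfold Spec_solution solution solution_alt
  set L := boxes.flatMap (fun b => [b.1, b.2]) with hL
  have hdict : boxes.foldl (fun d box => (d.modify box.1 0 (· + 1)).modify box.2 0 (· + 1))
      PySem.Dict.empty = PySem.Dict.counter L := by
    rw [PySem.Dict.counter_eq_foldl]
    exact foldl_boxes_eq_flat boxes PySem.Dict.empty
  simp only [hdict, PySem.Dict.keys_counter, PySem.Dict.getD_counter, ← PySem.List.dedup_eq_ofList]
  rw [foldl_if_sum (PySem.List.dedup L) (fun e => L.count e) 0, sum_halved_dedup L]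
  have hsorted : pairScan (PySem.List.sorted L (fun v => v) false) = (pvPairs L : Int) := by
    rw [pairScan_eq_pvPairs _ (by simpa using PySem.List.sorted_pairwise L (fun v => v))]
    rw [pvPairs_perm (PySem.List.sorted_perm L (fun v => v) false)]
  rw [hsorted]
  ring
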